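-- pv_equiv track=rewrite | github.com/JieWangnk/aortacfd-agent | src/aortacfd_agent/agents/execution.py | _parse_run_dir
-- ===== SOURCE A (Python) =====
-- from typing import Any, Dict, List, Optional, Sequence
--
-- _RUN_DIR_MARKERS = (
--     "Run directory:",
--     "Run dir:",
--     "Output dir:",
--     "Run output:",
-- )
--
-- def _parse_run_dir(stdout: str) -> Optional[str]:
--     """Best-effort extraction of the run directory from CLI stdout.
--
--     The AortaCFD CLI writes its output directory to stdout in a line like::
--
--         Run directory: output/BPM120/run_20260410_183022
--
--     If the format changes or the output is empty, we return None and the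
--     caller can fall back to scanning ``output/<patient_id>/`` itself.
--     """
--     if not stdout:
--         return None
--     for line in reversed(stdout.splitlines()):
--         line = line.strip()
--         for marker in _RUN_DIR_MARKERS:
--             if marker in line:
--                 tail = line.split(marker, 1)[1].strip()
--                 if tail:
--                     return tail
--     return None
-- ===== SOURCE B (Python) =====
-- _RUN_DIR_MARKERS = (
--     "Run directory:",
--     "Run dir:",
--     "Output dir:",
--     "Run output:",
-- )
--
-- def _tail_after_marker(line, marker):
--     """The stripped text after `marker` in `line`, or None if absent/empty."""
--     if marker not in line:
--         return None
--     tail = line.split(marker, 1)[1].strip()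
--     return tail or None
--
-- def _parse_run_dir(stdout):
--     result = None
--     for raw in stdout.splitlines():
--         line = raw.strip()
--         cand = next(
--             (t for t in (_tail_after_marker(line, m) for m in _RUN_DIR_MARKERS) if t),
--             None,
--         )
--         if cand is not None:
--             result = cand
--     return result
-- ===== Notes on version B (the rewrite author's own statement) =====
-- stated objective: alternative
-- what changed: Reverse scan with nested loops and early return is replaced by a forward scan that overwrites a single accumulator, with the per-line marker search factored into an Option-returning helper consumed by next() over a generator.
import Mathlib
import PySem

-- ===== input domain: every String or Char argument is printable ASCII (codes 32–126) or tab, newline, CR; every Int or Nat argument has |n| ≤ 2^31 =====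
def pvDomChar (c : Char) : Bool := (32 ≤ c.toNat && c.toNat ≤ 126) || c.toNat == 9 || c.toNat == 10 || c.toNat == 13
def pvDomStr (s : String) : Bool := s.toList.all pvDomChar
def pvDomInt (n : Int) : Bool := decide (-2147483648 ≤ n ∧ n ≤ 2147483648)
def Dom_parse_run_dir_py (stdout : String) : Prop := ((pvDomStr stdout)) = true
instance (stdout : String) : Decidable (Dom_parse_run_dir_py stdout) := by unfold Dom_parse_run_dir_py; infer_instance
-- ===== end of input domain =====

-- B replaces A's reverse scan with early return by a forward scan overwriting an
-- accumulator, the per-line marker search factored into an Option-returning helper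
-- (objective: alternative decomposition, same cost).

-- ===== PORT A =====
def pvMarkers : List String :=
  ["Run directory:", "Run dir:", "Output dir:", "Run output:"]

-- inner 'for marker in _RUN_DIR_MARKERS' loop of A: returns the first tail, none = fall through
def pvInnerA (line : String) : List String → Option String
  | [] => none
  | m :: ms =>
    if PySem.Str.isIn m line then
      let tail := PySem.Str.strip ((((PySem.Str.splitMax? line m 1).getD []).getD 1 ""))
      if tail ≠ "" then some tail else pvInnerA line ms
    else pvInnerA line ms

-- outer 'for line in reversed(stdout.splitlines())' loop of A
def pvLoopA : List String → Option String
  | [] => none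
  | l :: ls =>
    match pvInnerA (PySem.Str.strip l) pvMarkers with
    | some t => some t
    | none => pvLoopA ls

def parse_run_dir_py (stdout : String) : Option String :=
  if stdout = "" then none
  else pvLoopA (PySem.Str.splitlines stdout).reverse

-- ===== PORT B =====
-- _tail_after_marker(line, marker)
def pvTailAfter (line m : String) : Option String :=
  if ¬ PySem.Str.isIn m line then none
  else
    let tail := PySem.Str.strip ((((PySem.Str.splitMax? line m 1).getD []).getD 1 ""))
    if tail = "" then none else some tail

def parse_run_dir_py_alt (stdout : String) : Option String :=
  (PySem.Str.splitlines stdout).foldl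
    (fun result raw =>
      match pvMarkers.findSome? (pvTailAfter (PySem.Str.strip raw)) with
      | some cand => some cand
      | none => result)
    none

-- ===== PRECONDITION & SPEC =====
def Spec_parse_run_dir_py (stdout : String) (out : Option String) : Prop := out = parse_run_dir_py_alt stdout
instance (stdout : String) (out : Option String) : Decidable (Spec_parse_run_dir_py stdout out) := by unfold Spec_parse_run_dir_py; infer_instance

-- ===== CLAIM (what is proved, stated in full; the proofs are below) =====
def Claim_equal_parse_run_dir_py : Prop := ∀ (stdout : String), Dom_parse_run_dir_py stdout → Spec_parse_run_dir_py stdout (parse_run_dir_py stdout)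

-- ===== LEMMAS AND PROOFS =====

-- one step of A's inner marker loop, phrased through B's helper
theorem pvInnerA_step (line m : String) (ms : List String) :
    pvInnerA line (m :: ms) =
      match pvTailAfter line m with
      | some t => some t
      | none => pvInnerA line ms := by
  rw [pvInnerA, pvTailAfter]
  cases hb : PySem.Chars.isIn m.toList line.toList <;>
    by_cases ht : PySem.Str.strip (((PySem.Str.splitMax? line m 1).getD [])[1]?.getD "") = "" <;>
      simp [hb, ht]

-- A's inner marker loop is B's findSome? over the same helper
theorem pvInner_eq_findSome (line : String) (ms : List String) :
    pvInnerA line ms = ms.findSome? (pvTailAfter line) := by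
  induction ms with
  | nil => rfl
  | cons m ms ih =>
    rw [pvInnerA_step, ih, List.findSome?_cons]
    cases pvTailAfter line m <;> rfl

-- A's early-return loop splits over append
theorem pvLoopA_append (xs ys : List String) :
    pvLoopA (xs ++ ys) =
      match pvLoopA xs with
      | some t => some t
      | none => pvLoopA ys := by
  induction xs with
  | nil => rfl
  | cons l ls ih =>
    simp only [List.cons_append, pvLoopA]
    cases pvInnerA (PySem.Str.strip l) pvMarkers <;> simp [ih]

-- B's forward fold on ls equals A's loop on ls.reverse (with the fold's accumulator generalized)
theorem pvFold_eq_loopRev (ls : List String) (acc : Option String) :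
    ls.foldl
      (fun result raw =>
        match pvMarkers.findSome? (pvTailAfter (PySem.Str.strip raw)) with
        | some cand => some cand
        | none => result)
      acc =
      match pvLoopA ls.reverse with
      | some t => some t
      | none => acc := by
  induction ls generalizing acc with
  | nil => rfl
  | cons l ls ih =>
    simp only [List.foldl_cons, List.reverse_cons, ih, pvLoopA_append]
    have h1 : pvLoopA [l] = pvInnerA (PySem.Str.strip l) pvMarkers := by
      simp only [pvLoopA]; cases pvInnerA (PySem.Str.strip l) pvMarkers <;> rfl
    rw [h1, ← pvInner_eq_findSome]
    cases pvLoopA ls.reverse <;> cases pvInnerA (PySem.Str.strip l) pvMarkers <;> rfl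

-- ===== VERDICT (by name: the statement is the Claim_ definition above) =====
theorem parse_run_dir_py_spec : Claim_equal_parse_run_dir_py := by
  intro stdout _
  unfold Spec_parse_run_dir_py parse_run_dir_py parse_run_dir_py_alt
  by_cases h : stdout = ""
  · subst h; rfl
  · simp only [h, if_false]
    rw [pvFold_eq_loopRev]
    cases pvLoopA (PySem.Str.splitlines stdout).reverse <;> rfl
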